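-- pv_equiv track=rewrite | github.com/Kyaw-Thiha/is-optimal-language-all-you-need | src/datahub/preprocess.py | _normalize_selection
-- ===== SOURCE A (Python) =====
-- from typing import Dict, List, Optional, Sequence, Set, Literal
--
-- DatasetId = Literal["xlwsd", "xlwic", "mclwic"]
--
-- ALL_DATASETS: Sequence[DatasetId] = ("xlwsd", "xlwic", "mclwic")
--
-- def _normalize_selection(datasets: Optional[Sequence[DatasetId]]) -> Sequence[DatasetId]:
--     """Return a deterministic, validated tuple of dataset ids."""
--     if not datasets:
--         return tuple(ALL_DATASETS)
--
--     seen: Set[str] = set()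
--     normalized = []
--     for dataset in datasets:
--         if dataset not in ALL_DATASETS:
--             raise ValueError(f"Unknown dataset key '{dataset}'")
--         if dataset in seen:
--             continue
--         normalized.append(dataset)
--         seen.add(dataset)
--     return tuple(normalized)
-- ===== SOURCE B (Python) =====
-- from typing import Optional, Sequence
--
-- ALL_DATASETS = ("xlwsd", "xlwic", "mclwic")
--
-- def _normalize_selection(datasets):
--     """Recursive head/filter dedup: no seen-set, no accumulator."""
--     if not datasets:
--         return tuple(ALL_DATASETS)
--     return _take_firsts(list(datasets))
--
-- def _take_firsts(ds):
--     if not ds: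
--         return ()
--     head = ds[0]
--     if head not in ALL_DATASETS:
--         raise ValueError(f"Unknown dataset key '{head}'")
--     return (head,) + _take_firsts([d for d in ds[1:] if d != head])
-- ===== Notes on version B (the rewrite author's own statement) =====
-- stated objective: alternative
-- what changed: Replaces A's single iterative pass with a seen-set and accumulator by a recursive head-and-filter dedup: keep the head, validate it, and recurse on the tail with all later copies of the head filtered out; no set and no accumulator are maintained.
import Mathlib
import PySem

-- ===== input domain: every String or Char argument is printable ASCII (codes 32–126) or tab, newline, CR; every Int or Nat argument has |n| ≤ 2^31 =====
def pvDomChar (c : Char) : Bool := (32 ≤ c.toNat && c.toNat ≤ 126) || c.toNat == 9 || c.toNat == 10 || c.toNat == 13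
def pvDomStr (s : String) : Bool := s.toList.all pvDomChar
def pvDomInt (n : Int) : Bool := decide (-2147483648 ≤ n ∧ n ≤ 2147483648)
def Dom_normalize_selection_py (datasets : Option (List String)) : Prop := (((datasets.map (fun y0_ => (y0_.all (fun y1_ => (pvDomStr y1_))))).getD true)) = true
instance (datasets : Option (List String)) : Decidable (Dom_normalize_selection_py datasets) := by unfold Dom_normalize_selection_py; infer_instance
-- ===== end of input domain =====

-- B replaces A's iterative seen-set + accumulator pass by a recursive head-and-filter dedup (objective: alternative).

-- ===== PORT A =====
def pyAllDatasets : List String := ["xlwsd", "xlwic", "mclwic"]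

-- A's loop: seen-set + accumulator; `none` = the ValueError raise on an unknown key
def aLoop : List String → PySem.Set String → List String → Option (List String)
  | [], _, normalized => some normalized
  | d :: rest, seen, normalized =>
    if ¬ (pyAllDatasets.contains d) then none          -- raise ValueError
    else if PySem.Set.contains seen d then aLoop rest seen normalized   -- continue
    else aLoop rest (PySem.Set.add seen d) (normalized ++ [d])

def normalize_selection_py (datasets : Option (List String)) : List String :=
  match datasets with
  | none => pyAllDatasets
  | some ds =>
    if ds = [] then pyAllDatasets
    else (aLoop ds PySem.Set.empty []).getD []          -- getD unreachable under Pre_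

-- ===== PORT B =====
-- B's _take_firsts: keep the head, validate it, recurse on the tail with later copies filtered out
def bTakeFirsts : List String → Option (List String)
  | [] => some []
  | h :: rest =>
    if ¬ (pyAllDatasets.contains h) then none           -- raise ValueError
    else match bTakeFirsts (rest.filter (fun d => d ≠ h)) with
      | none => none
      | some t => some (h :: t)
termination_by ds => ds.length
decreasing_by
  simpa using Nat.lt_succ_of_le (List.length_filter_le _ rest.attach)

def normalize_selection_py_alt (datasets : Option (List String)) : List String :=
  match datasets with
  | none => pyAllDatasets
  | some ds =>
    if ds = [] then pyAllDatasets
    else (bTakeFirsts ds).getD []                       -- getD unreachable under Pre_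

-- ===== PRECONDITION & SPEC =====
-- Pre_ excludes exactly the inputs where A raises ValueError: a nonempty list containing a key not in ALL_DATASETS.
def Pre_normalize_selection_py (datasets : Option (List String)) : Prop :=
  ((datasets.map (fun ds => ds.isEmpty || ds.all (fun d => pyAllDatasets.contains d))).getD true) = true
instance (datasets : Option (List String)) : Decidable (Pre_normalize_selection_py datasets) := by unfold Pre_normalize_selection_py; infer_instance

def pvWitness_normalize_selection_py : Option (List String) := some ["xlwic", "xlwic", "xlwsd"]

def Spec_normalize_selection_py (datasets : Option (List String)) (out : List String) : Prop := out = normalize_selection_py_alt datasets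
instance (datasets : Option (List String)) (out : List String) : Decidable (Spec_normalize_selection_py datasets out) := by unfold Spec_normalize_selection_py; infer_instance

-- ===== CLAIM =====
def Claim_equal_normalize_selection_py : Prop := ∀ (datasets : Option (List String)), Dom_normalize_selection_py datasets → Pre_normalize_selection_py datasets → Spec_normalize_selection_py datasets (normalize_selection_py datasets)

-- ===== LEMMAS AND PROOFS =====

-- A's loop equals B's recursion on the list with the already-seen keys filtered out,
-- prefixed by A's accumulator (valid inputs only).
theorem aLoop_eq_bTakeFirsts (ds : List String) (s : PySem.Set String) (acc : List String)
    (h : ds.all (fun d => pyAllDatasets.contains d) = true) :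
    aLoop ds s acc =
      (bTakeFirsts (ds.filter (fun d => ¬ PySem.Set.contains s d))).map (fun t => acc ++ t) := by
  induction ds generalizing s acc with
  | nil => simp [aLoop, bTakeFirsts]
  | cons d rest ih =>
    simp only [List.all_cons, Bool.and_eq_true] at h
    by_cases hc : PySem.Set.contains s d = true
    · rw [aLoop, if_neg (by simpa using h.1), if_pos hc]
      rw [List.filter_cons_of_neg (by simpa using hc)]
      exact ih s acc h.2
    · rw [aLoop, if_neg (by simpa using h.1), if_neg hc]
      rw [List.filter_cons_of_pos (by simpa using hc)]
      rw [bTakeFirsts, if_neg (by simpa using h.1)]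
      have hadd : PySem.Set.add s d = s ++ [d] := by
        unfold PySem.Set.add; rw [if_neg hc]
      have hfilt : rest.filter (fun x => ¬ PySem.Set.contains (PySem.Set.add s d) x)
          = (rest.filter (fun x => ¬ PySem.Set.contains s x)).filter (fun x => x ≠ d) := by
        rw [List.filter_filter]
        apply List.filter_congr
        intro x _
        by_cases h1 : List.contains s x = true <;> by_cases h2 : x = d <;>
          simp [hadd, PySem.Set.contains, List.contains_append, h1, h2]
      rw [ih (PySem.Set.add s d) (acc ++ [d]) h.2, hfilt]
      cases bTakeFirsts ((rest.filter (fun x => ¬ PySem.Set.contains s x)).filter (fun x => x ≠ d)) with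
      | none => simp
      | some t => simp

-- ===== VERDICT =====
theorem normalize_selection_py_spec : Claim_equal_normalize_selection_py := by
  intro datasets _ hpre
  unfold Spec_normalize_selection_py normalize_selection_py normalize_selection_py_alt
  cases datasets with
  | none => rfl
  | some ds =>
    unfold Pre_normalize_selection_py at hpre
    simp only [Option.map_some, Option.getD_some, Bool.or_eq_true, List.isEmpty_iff] at hpre
    rcases hpre with h | h
    · simp [h]
    · by_cases hnil : ds = []
      · simp [hnil]
      · dsimp only
        rw [if_neg hnil, if_neg hnil,
          aLoop_eq_bTakeFirsts ds PySem.Set.empty [] h]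
        have : ds.filter (fun d => ¬ PySem.Set.contains PySem.Set.empty d) = ds := by
          apply List.filter_eq_self.mpr
          intro x _
          simp [PySem.Set.empty, PySem.Set.contains]
        rw [this]
        cases bTakeFirsts ds with
        | none => rfl
        | some t => simp
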